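-- pv_equiv track=rewrite | github.com/morinlab/ProDuSe | nucleotide.py | make_ambiguous
-- ===== SOURCE A (Python) =====
-- CAPUI = {
--     'A':'A',
--     'C':'C',
--     'G':'G',
--     'T':'T',
--     'AC':'M',
--     'AG':'R',
--     'AT':'W',
--     'CG':'S',
--     'CT':'Y',
--     'GT':'K',
--     'ACG':'V',
--     'ACT':'H',
--     'AGT':'D',
--     'CGT':'B',
--     'ACGT':'N'
--     }
--
-- def make_ambiguous(list_of_seq):
--
--     ambiguous_list = []
--
--     for i in range(len(list_of_seq[0])):
--         ambiguous_list.append([])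
--
--     for seq in list_of_seq:
--         for i in range(len(seq)):
--             if not seq[i] in ambiguous_list[i]:
--                 ambiguous_list[i].append(seq[i])
--
--     ambiguous_seq = ''
--
--     for seq in ambiguous_list:
--         seq.sort()
--         ambiguous_seq = ''.join([ambiguous_seq, CAPUI[''.join(seq)]])
--
--     return ambiguous_seq
-- ===== SOURCE B (Python) =====
-- # B: column-major bitmask consensus — per column OR the nucleotide bits (A=1,C=2,G=4,T=8)
-- # and index a 16-entry IUPAC table by the mask; no per-column dedup lists, no sorting,
-- # no string-keyed dict.
-- IUPAC = '?ACMGRSVTWYHKDBN'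
-- BIT = {'A': 1, 'C': 2, 'G': 4, 'T': 8}
--
-- def make_ambiguous(list_of_seq):
--     out = []
--     for i in range(len(list_of_seq[0])):
--         mask = 0
--         for seq in list_of_seq:
--             if i < len(seq):
--                 mask |= BIT[seq[i]]
--         out.append(IUPAC[mask])
--     return ''.join(out)
-- ===== Notes on version B (the rewrite author's own statement) =====
-- stated objective: alternative
-- what changed: Replaces A's per-column dedup lists, per-column sort and string-keyed CAPUI dict with a column-major pass that ORs fixed nucleotide bit codes (A=1,C=2,G=4,T=8) into one integer mask per column and indexes a 16-entry IUPAC string by the mask, so no sorting, no set/list building and no dict key construction remain.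
import Mathlib
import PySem

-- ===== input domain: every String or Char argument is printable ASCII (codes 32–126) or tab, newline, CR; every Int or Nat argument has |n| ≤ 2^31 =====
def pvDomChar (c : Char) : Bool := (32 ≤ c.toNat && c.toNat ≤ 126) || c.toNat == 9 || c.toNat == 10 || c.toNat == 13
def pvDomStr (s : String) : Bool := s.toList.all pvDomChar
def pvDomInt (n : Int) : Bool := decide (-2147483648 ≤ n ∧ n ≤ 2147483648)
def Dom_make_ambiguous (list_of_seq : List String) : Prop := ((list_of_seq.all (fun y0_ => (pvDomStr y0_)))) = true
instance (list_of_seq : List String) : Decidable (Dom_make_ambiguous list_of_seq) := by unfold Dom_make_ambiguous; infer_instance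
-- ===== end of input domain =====

-- B replaces A's per-column dedup lists + sort + string-keyed dict with a column-major
-- pass that ORs nucleotide bit codes (A=1,C=2,G=4,T=8) into an integer mask per column
-- and indexes a 16-entry IUPAC table by the mask (alternative algorithm, same cost).

-- ===== PORT A =====
def CAPUI : PySem.Dict String String :=
  PySem.Dict.ofList [("A","A"), ("C","C"), ("G","G"), ("T","T"),
   ("AC","M"), ("AG","R"), ("AT","W"), ("CG","S"), ("CT","Y"), ("GT","K"),
   ("ACG","V"), ("ACT","H"), ("AGT","D"), ("CGT","B"), ("ACGT","N")]

-- literal port of A; where the Python raises (empty input: IndexError on list_of_seq[0],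
-- out-of-range column index, missing CAPUI key) the total forms' defaults are used and
-- Pre_ excludes those inputs
def make_ambiguous (list_of_seq : List String) : String :=
  match PySem.List.pyGet? list_of_seq 0 with
  | none => ""   -- Python: IndexError; outside Pre_
  | some s0 =>
    let ambiguous_list : List (List Char) :=
      (PySem.List.pyRange 0 (PySem.Str.len s0) 1).foldl (fun acc _ => acc ++ [[]]) []
    let ambiguous_list : List (List Char) :=
      list_of_seq.foldl (fun al seq =>
        (PySem.List.pyRange 0 (PySem.Str.len seq) 1).foldl (fun al i =>
          let c := (PySem.Str.pyGet? seq i).getD ' '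
          let col := PySem.List.pyGetD al i []
          if c ∈ col then al else PySem.List.pySetD al i (col ++ [c])) al) ambiguous_list
    ambiguous_list.foldl (fun amb col =>
      PySem.Str.join "" [amb, (CAPUI.getD (String.ofList (PySem.List.sorted col (fun x => x) false)) "")]) ""

-- ===== PORT B =====
def IUPAC : String := "?ACMGRSVTWYHKDBN"
def BIT : PySem.Dict Char Int := PySem.Dict.ofList [('A',1), ('C',2), ('G',4), ('T',8)]

-- literal port of Source B; BIT[seq[i]] raises KeyError on a non-ACGT character and
-- list_of_seq[0] raises IndexError on empty input — outside Pre_, defaults used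
def make_ambiguous_alt (list_of_seq : List String) : String :=
  match PySem.List.pyGet? list_of_seq 0 with
  | none => ""   -- Python: IndexError; outside Pre_
  | some s0 =>
    let out : List String :=
      (PySem.List.pyRange 0 (PySem.Str.len s0) 1).foldl (fun out i =>
        let mask : Int := list_of_seq.foldl (fun mask seq =>
          if i < PySem.Str.len seq then
            PySem.Int.bor mask (BIT.getD ((PySem.Str.pyGet? seq i).getD ' ') 0)
          else mask) 0
        out ++ [String.ofList [(PySem.Str.pyGet? IUPAC mask).getD ' ']]) []
    PySem.Str.join "" out

-- ===== PRECONDITION & SPEC =====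
-- Pre_ excludes exactly the inputs where A raises: the empty list (IndexError on
-- list_of_seq[0]), a sequence longer than the first (IndexError on ambiguous_list[i])
-- and characters outside ACGT (KeyError in CAPUI).
def Pre_make_ambiguous (list_of_seq : List String) : Prop :=
  list_of_seq ≠ [] ∧
  (list_of_seq.all (fun s => decide (PySem.Str.len s ≤ PySem.Str.len (list_of_seq.headD "")) &&
     s.toList.all (fun c => ['A','C','G','T'].contains c))) = true
instance (list_of_seq : List String) : Decidable (Pre_make_ambiguous list_of_seq) := by
  unfold Pre_make_ambiguous; infer_instance

def pvWitness_make_ambiguous : List String := ["ACGT", "AAGT", "CCGA"]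

def Spec_make_ambiguous (list_of_seq : List String) (out : String) : Prop := out = make_ambiguous_alt list_of_seq
instance (list_of_seq : List String) (out : String) : Decidable (Spec_make_ambiguous list_of_seq out) := by unfold Spec_make_ambiguous; infer_instance

-- ===== CLAIM (what is proved, stated in full; the proofs are below) =====
def Claim_equal_make_ambiguous : Prop := ∀ (list_of_seq : List String), Dom_make_ambiguous list_of_seq → Pre_make_ambiguous list_of_seq → Spec_make_ambiguous list_of_seq (make_ambiguous list_of_seq)

-- ===== LEMMAS AND PROOFS =====

-- one write of A's scatter loop: append the char if the column does not yet have it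
def updCol (col : List Char) (c : Char) : List Char := if c ∈ col then col else col ++ [c]

-- the Nat-level step of A's inner loop
def stepA (cs : List Char) (al : List (List Char)) (k : Nat) : List (List Char) :=
  let c := (cs.getD k ' ')
  let col := al.getD k []
  if c ∈ col then al else al.set k (col ++ [c])

theorem foldl_ext {α β : Type} (f g : α → β → α) (l : List β) (init : α)
    (h : ∀ a b, f a b = g a b) : l.foldl f init = l.foldl g init := by
  have : f = g := funext fun a => funext fun b => h a b
  rw [this]

theorem initFold (m : Nat) (acc : List (List Char)) :
    (PySem.List.pyRange 0 (m : Int) 1).foldl (fun acc _ => acc ++ [[]]) acc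
      = acc ++ List.replicate m ([] : List Char) := by
  induction m generalizing acc with
  | zero => simp
  | succ m ih =>
    rw [show ((m + 1 : Nat) : Int) = (m : Int) + 1 by push_cast; ring,
        PySem.List.pyRange_one_succ_right (by positivity), List.foldl_append]
    simp [ih, List.replicate_succ']

theorem stepA_cons (c : Char) (cs : List Char) (x : List Char) (rest : List (List Char)) (k : Nat) :
    stepA (c :: cs) (x :: rest) (k + 1) = x :: stepA cs rest k := by
  simp only [stepA, List.getD_cons_succ, List.set_cons_succ]
  split_ifs <;> rfl

theorem innerShift (ks : List Nat) (c : Char) (cs : List Char) (x : List Char) (rest : List (List Char)) :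
    ks.foldl (fun al k => stepA (c :: cs) al (k + 1)) (x :: rest)
      = x :: ks.foldl (fun al k => stepA cs al k) rest := by
  induction ks generalizing x rest with
  | nil => rfl
  | cons k ks ih => rw [List.foldl_cons, stepA_cons, ih, List.foldl_cons]

theorem innerNil (ks : List Nat) (cs : List Char) :
    ks.foldl (fun al k => stepA cs al k) [] = [] := by
  induction ks with
  | nil => rfl
  | cons k ks ih =>
    rw [List.foldl_cons, show stepA cs [] k = [] by simp [stepA], ih]

theorem innerFold (cs : List Char) (al : List (List Char)) :
    (List.range cs.length).foldl (fun al k => stepA cs al k) al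
      = List.zipWith updCol al cs ++ al.drop cs.length := by
  induction cs generalizing al with
  | nil => simp
  | cons c cs ih =>
    cases al with
    | nil => simpa using innerNil _ _
    | cons a rest =>
      have hstep : stepA (c :: cs) (a :: rest) 0 = updCol a c :: rest := by
        simp only [stepA, updCol, List.getD_cons_zero, List.set_cons_zero]
        split_ifs <;> rfl
      rw [List.length_cons, List.range_succ_eq_map, List.foldl_cons, List.foldl_map, hstep]
      simp only [Nat.succ_eq_add_one]
      rw [innerShift, ih]
      simp

-- A's inner loop, as written over pyRange with Int indices, is the Nat-level fold
theorem innerFoldInt (seq : String) (al : List (List Char)) :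
    (PySem.List.pyRange 0 (PySem.Str.len seq) 1).foldl (fun al i =>
        let c := (PySem.Str.pyGet? seq i).getD ' '
        let col := PySem.List.pyGetD al i []
        if c ∈ col then al else PySem.List.pySetD al i (col ++ [c])) al
      = (List.range seq.toList.length).foldl (fun al k => stepA seq.toList al k) al := by
  rw [PySem.Str.len_eq, PySem.List.pyRange_one]
  simp only [Int.sub_zero, Int.toNat_natCast, List.foldl_map]
  apply foldl_ext
  intro al k
  simp [stepA, List.getD]

theorem outerFold (xss : List (List Char)) (al : List (List Char))
    (h : ∀ cs ∈ xss, cs.length ≤ al.length) :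
    xss.foldl (fun al cs => List.zipWith updCol al cs ++ al.drop cs.length) al
      = (List.range al.length).map (fun i =>
          ((xss.filter (fun cs => decide (i < cs.length))).map (fun cs => cs.getD i ' ')).foldl
            updCol (al.getD i [])) := by
  induction xss generalizing al with
  | nil =>
    apply List.ext_getElem (by simp)
    intro i h1 h2
    simp at h2
    simp [List.getD, h2]
  | cons cs xss ih =>
    have hlen : cs.length ≤ al.length := h cs (by simp)
    have hzlen : (List.zipWith updCol al cs ++ al.drop cs.length).length = al.length := by
      simp
      omega
    rw [List.foldl_cons, ih _ (by intro x hx; rw [hzlen]; exact h x (List.mem_cons_of_mem _ hx)), hzlen]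
    apply List.map_congr_left
    intro i hi
    rw [List.mem_range] at hi
    rw [List.filter_cons]
    by_cases hic : i < cs.length
    · rw [if_pos (by simpa using hic), List.map_cons, List.foldl_cons]
      congr 1
      rw [List.getD_eq_getElem?_getD, List.getElem?_append_left (by simp; omega),
        List.getElem?_zipWith, List.getElem?_eq_getElem hi, List.getElem?_eq_getElem hic]
      simp [List.getD_eq_getElem?_getD, List.getElem?_eq_getElem hi, List.getElem?_eq_getElem hic]
    · rw [if_neg (by simpa using hic)]
      congr 1
      rw [List.getD_eq_getElem?_getD, List.getElem?_append_right (by simp; omega)]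
      have h2 : i - (List.zipWith updCol al cs).length = i - cs.length := by simp; omega
      rw [h2, List.getElem?_drop]
      have h3 : cs.length + (i - cs.length) = i := by omega
      rw [h3, List.getD_eq_getElem?_getD]

theorem foldl_updCol_eq_ofList (cs : List Char) :
    cs.foldl updCol [] = PySem.Set.ofList cs := by
  rw [PySem.Set.ofList_eq_foldl]
  apply foldl_ext
  intro s c
  simp [updCol, PySem.Set.add]

theorem interc_nil {α : Type} (l : List (List α)) : List.intercalate [] l = l.flatten := by
  induction l with
  | nil => rfl
  | cons a t ih =>
    cases t with
    | nil => simp [List.intercalate]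
    | cons b r =>
      simp only [List.intercalate, List.intersperse] at *
      simpa using ih

theorem join_cons (a : String) (l : List String) :
    PySem.Str.join "" (a :: l) = a ++ PySem.Str.join "" l := by
  simp only [PySem.Str.join, String.toList_empty, PySem.Chars.join, interc_nil, List.map_cons,
    List.flatten_cons]
  rw [String.ofList_append]
  simp

theorem join_nil : PySem.Str.join "" ([] : List String) = "" := by rfl

theorem joinFold (f : List Char → String) (cols : List (List Char)) (init : String) :
    cols.foldl (fun amb col => PySem.Str.join "" [amb, f col]) init
      = init ++ PySem.Str.join "" (cols.map f) := by
  induction cols generalizing init with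
  | nil => rw [List.foldl_nil, List.map_nil, join_nil, String.append_empty]
  | cons col cols ih =>
    rw [List.foldl_cons, ih, List.map_cons, join_cons, join_cons, join_cons, join_nil,
      String.append_empty, String.append_assoc]

theorem outerBridge (ls : List String) (al : List (List Char)) :
    ls.foldl (fun al seq =>
      (PySem.List.pyRange 0 (PySem.Str.len seq) 1).foldl (fun al i =>
        let c := (PySem.Str.pyGet? seq i).getD ' '
        let col := PySem.List.pyGetD al i []
        if c ∈ col then al else PySem.List.pySetD al i (col ++ [c])) al) al
      = (ls.map String.toList).foldl
          (fun al cs => List.zipWith updCol al cs ++ al.drop cs.length) al := by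
  induction ls generalizing al with
  | nil => rfl
  | cons s ls ih =>
    rw [List.foldl_cons, innerFoldInt, innerFold, List.map_cons, List.foldl_cons, ih]

-- ===== B-side lemmas =====

-- the Nat-level bit code of a nucleotide
def bitN (c : Char) : Nat :=
  if c = 'A' then 1 else if c = 'C' then 2 else if c = 'G' then 4 else if c = 'T' then 8 else 0

-- membership-determined value of the OR-accumulated column mask
def maskOf (cs : List Char) : Nat :=
  (if 'A' ∈ cs then 1 else 0) ||| (if 'C' ∈ cs then 2 else 0) |||
  (if 'G' ∈ cs then 4 else 0) ||| (if 'T' ∈ cs then 8 else 0)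

theorem maskNat (cs : List Char)
    (hsub : ∀ c ∈ cs, c = 'A' ∨ c = 'C' ∨ c = 'G' ∨ c = 'T') (m : Nat) :
    cs.foldl (fun m c => m ||| bitN c) m = m ||| maskOf cs := by
  induction cs generalizing m with
  | nil => simp [maskOf]
  | cons c cs ih =>
    rw [List.foldl_cons, ih (fun x hx => hsub x (List.mem_cons_of_mem _ hx)),
      Nat.lor_assoc]
    have hkey : bitN c ||| maskOf cs = maskOf (c :: cs) := by
      rcases hsub c List.mem_cons_self with rfl | rfl | rfl | rfl <;>
        simp only [maskOf, bitN, List.mem_cons, if_true] <;>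
        by_cases h1 : 'A' ∈ cs <;> by_cases h2 : 'C' ∈ cs <;>
        by_cases h3 : 'G' ∈ cs <;> by_cases h4 : 'T' ∈ cs <;>
        simp [h1, h2, h3, h4]
    rw [hkey]

-- B's Int-valued OR fold is the Nat-valued one, cast
theorem maskIntNat (cs : List Char)
    (hsub : ∀ c ∈ cs, c = 'A' ∨ c = 'C' ∨ c = 'G' ∨ c = 'T') (m : Nat) :
    cs.foldl (fun m c => PySem.Int.bor m (BIT.getD c 0)) ((m : Nat) : Int)
      = ((cs.foldl (fun m c => m ||| bitN c) m : Nat) : Int) := by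
  induction cs generalizing m with
  | nil => rfl
  | cons c cs ih =>
    rw [List.foldl_cons, List.foldl_cons]
    have hbit : BIT.getD c 0 = ((bitN c : Nat) : Int) := by
      rcases hsub c List.mem_cons_self with rfl | rfl | rfl | rfl <;> rfl
    rw [hbit, PySem.Int.bor_natCast, ih (fun x hx => hsub x (List.mem_cons_of_mem _ hx))]

-- sorted(set(cs)) for ACGT characters is the canonical subsequence of "ACGT"
theorem sortedCanon (cs : List Char)
    (hsub : ∀ c ∈ cs, c = 'A' ∨ c = 'C' ∨ c = 'G' ∨ c = 'T') :
    PySem.List.sorted (PySem.Set.ofList cs) (fun x => x) false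
      = ['A', 'C', 'G', 'T'].filter (fun c => decide (c ∈ cs)) := by
  apply PySem.List.sorted_eq_of_perm_of_pairwise_lt
  · apply (List.perm_ext_iff_of_nodup _ (PySem.Set.nodup_ofList cs)).mpr
    · intro x
      simp only [List.mem_filter, PySem.Set.mem_ofList, decide_eq_true_iff]
      constructor
      · rintro ⟨_, hx⟩; exact hx
      · intro hx
        refine ⟨?_, hx⟩
        rcases hsub x hx with rfl | rfl | rfl | rfl <;> decide
    · exact List.Nodup.filter _ (by decide)
  · exact List.Pairwise.filter _ (by decide)

-- the per-column agreement: A's table lookup on the sorted set equals B's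
-- table character at the OR mask, for a nonempty ACGT column
theorem colAgree (cs : List Char) (hne : cs ≠ [])
    (hsub : ∀ c ∈ cs, c = 'A' ∨ c = 'C' ∨ c = 'G' ∨ c = 'T') :
    CAPUI.getD (String.ofList (PySem.List.sorted (PySem.Set.ofList cs) (fun x => x) false)) ""
      = String.ofList [(PySem.Str.pyGet? IUPAC
          (cs.foldl (fun m c => PySem.Int.bor m (BIT.getD c 0)) 0)).getD ' '] := by
  have hm : cs.foldl (fun m c => PySem.Int.bor m (BIT.getD c 0)) 0
      = ((maskOf cs : Nat) : Int) := by
    have h := maskIntNat cs hsub 0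
    rw [maskNat cs hsub 0, Nat.zero_or] at h
    simpa using h
  rw [sortedCanon cs hsub, hm]
  have hone : 'A' ∈ cs ∨ 'C' ∈ cs ∨ 'G' ∈ cs ∨ 'T' ∈ cs := by
    cases cs with
    | nil => exact absurd rfl hne
    | cons c cs =>
      rcases hsub c List.mem_cons_self with rfl | rfl | rfl | rfl
      · exact Or.inl List.mem_cons_self
      · exact Or.inr (Or.inl List.mem_cons_self)
      · exact Or.inr (Or.inr (Or.inl List.mem_cons_self))
      · exact Or.inr (Or.inr (Or.inr List.mem_cons_self))
  by_cases h1 : 'A' ∈ cs <;> by_cases h2 : 'C' ∈ cs <;>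
    by_cases h3 : 'G' ∈ cs <;> by_cases h4 : 'T' ∈ cs <;>
    simp only [maskOf, List.filter, h1, h2, h3, h4, decide_true, decide_false, if_true] <;>
    first
      | decide
      | (exact absurd hone (by simp [h1, h2, h3, h4]))

-- ===== VERDICT (by name: the statement is the Claim_ definition above) =====
theorem make_ambiguous_spec : Claim_equal_make_ambiguous := by
  intro l _ hpre
  obtain ⟨hne, hall⟩ := hpre
  rw [List.all_eq_true] at hall
  unfold Spec_make_ambiguous
  cases l with
  | nil => exact absurd rfl hne
  | cons s0 rest =>
    have hlen' : ∀ s ∈ s0 :: rest, s.toList.length ≤ s0.toList.length := by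
      intro s hs
      have hb := hall s hs
      rw [Bool.and_eq_true] at hb
      have := hb.1
      rw [decide_eq_true_iff] at this
      simp only [List.headD_cons, PySem.Str.len_eq] at this
      exact_mod_cast this
    have hacgt : ∀ s ∈ s0 :: rest, ∀ c ∈ s.toList,
        c = 'A' ∨ c = 'C' ∨ c = 'G' ∨ c = 'T' := by
      intro s hs c hc
      have hb := hall s hs
      rw [Bool.and_eq_true] at hb
      have := hb.2
      rw [List.all_eq_true] at this
      have hcc := this c hc
      simp at hcc
      tauto
    -- reduce A
    rw [make_ambiguous]
    rw [PySem.List.pyGet?_zero_cons]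
    simp only []
    rw [show PySem.Str.len s0 = ((s0.toList.length : Nat) : Int) by simp [PySem.Str.len_eq]]
    rw [initFold, List.nil_append]
    have hmap : ∀ cs ∈ (s0 :: rest).map String.toList,
        cs.length ≤ (List.replicate s0.toList.length ([] : List Char)).length := by
      intro cs hcs
      rw [List.mem_map] at hcs
      obtain ⟨y, hy, rfl⟩ := hcs
      simpa using hlen' y hy
    rw [outerBridge, outerFold _ _ hmap, List.length_replicate, joinFold, String.empty_append]
    -- reduce B
    rw [make_ambiguous_alt]
    rw [PySem.List.pyGet?_zero_cons]
    simp only []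
    rw [show PySem.Str.len s0 = ((s0.toList.length : Nat) : Int) by simp [PySem.Str.len_eq]]
    rw [PySem.List.foldl_append_singleton_eq_map, PySem.List.pyRange_one]
    simp only [Int.sub_zero, Int.toNat_natCast, List.map_map, List.map_map]
    apply congrArg (PySem.Str.join "")
    apply List.map_congr_left
    intro i hi
    rw [List.mem_range] at hi
    simp only [Function.comp_apply, Int.zero_add]
    -- the replicate default is []
    have hrep : (List.replicate s0.toList.length ([] : List Char)).getD i [] = [] := by
      rw [List.getD_eq_getElem?_getD, List.getElem?_replicate, if_pos hi]; rfl
    rw [hrep, foldl_updCol_eq_ofList]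
    -- B's guarded fold over strings is the fold over the same column character list
    have hBfold :
        (s0 :: rest).foldl (fun mask seq =>
            if (i : Int) < PySem.Str.len seq then
              PySem.Int.bor mask (BIT.getD ((PySem.Str.pyGet? seq (i : Int)).getD ' ') 0)
            else mask) 0
          = ((((s0 :: rest).map String.toList).filter (fun cs => decide (i < cs.length))).map
              (fun cs => cs.getD i ' ')).foldl
              (fun m c => PySem.Int.bor m (BIT.getD c 0)) 0 := by
      rw [List.foldl_map]
      rw [PySem.List.foldl_ite_eq_foldl_filter
        (p := fun seq : String => (i : Int) < PySem.Str.len seq)]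
      rw [List.filter_map, List.foldl_map]
      have hfil : (fun seq : String => decide ((i : Int) < PySem.Str.len seq))
          = ((fun cs : List Char => decide (i < cs.length)) ∘ String.toList) := by
        funext seq
        simp only [Function.comp_apply, PySem.Str.len_eq]
        exact decide_eq_decide.mpr (by exact_mod_cast Iff.rfl)
      rw [hfil]
      apply foldl_ext
      intro m cs
      simp [List.getD]
    rw [hBfold]
    -- the column character list: nonempty, all ACGT
    set cs := (((s0 :: rest).map String.toList).filter (fun cs => decide (i < cs.length))).map
      (fun cs => cs.getD i ' ') with hcs
    have hsub : ∀ c ∈ cs, c = 'A' ∨ c = 'C' ∨ c = 'G' ∨ c = 'T' := by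
      intro c hc
      rw [hcs, List.mem_map] at hc
      obtain ⟨col, hcol, rfl⟩ := hc
      rw [List.mem_filter] at hcol
      obtain ⟨hcol, hilt⟩ := hcol
      rw [List.mem_map] at hcol
      obtain ⟨s, hsmem, rfl⟩ := hcol
      rw [decide_eq_true_iff] at hilt
      have hget : (String.toList s).getD i ' ' = (String.toList s)[i] := by
        rw [List.getD_eq_getElem?_getD, List.getElem?_eq_getElem hilt]; rfl
      rw [hget]
      exact hacgt s hsmem _ (List.getElem_mem _)
    have hcne : cs ≠ [] := by
      rw [hcs]
      have : s0.toList ∈ ((s0 :: rest).map String.toList).filter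
          (fun cs => decide (i < cs.length)) := by
        rw [List.mem_filter]
        exact ⟨by simp, by simpa using hi⟩
      intro hnil
      rw [List.map_eq_nil_iff] at hnil
      rw [hnil] at this
      exact (List.not_mem_nil) this
    exact colAgree cs hcne hsub
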